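-- pv_equiv track=rewrite | github.com/dssg-nyc/FOIA-Fluent | backend/app/data/signal_categories.py | derive_persona_tags
-- ===== SOURCE A (Python) =====
-- PERSONA_BUNDLES: dict[str, list[str]] = {
--     "journalist": [
--         "oversight_findings",
--         "agency_enforcement",
--         "foia_logs",
--         "government_litigation",
--         "campaign_finance",
--         "lobbying_ethics",
--         "tax_enforcement",
--     ],
--     "pharma_analyst": [
--         "agency_warnings",
--         "drug_recalls",
--         "device_recalls",
--         "securities_litigation",
--     ],
--     "hedge_fund": [
--         "securities_litigation",
--         "agency_enforcement",
--         "federal_contracts",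
--         "court_opinions",
--         "drug_recalls",
--         "device_recalls",
--     ],
--     "environmental": [
--         "agency_enforcement",
--         "oversight_findings",
--         "regulatory_dockets",
--     ],
--     "policy_researcher": [
--         "legislation",
--         "regulatory_dockets",
--         "oversight_findings",
--         "executive_actions",
--         "lobbying_ethics",
--     ],
--     "legal_analyst": [
--         "court_opinions",
--         "securities_litigation",
--         "government_litigation",
--         "agency_enforcement",
--         "foia_logs",
--         "campaign_finance",
--         "tax_enforcement",
--     ],
--     "consumer_safety": [
--         "drug_recalls",
--         "food_recalls",
--         "device_recalls",
--         "vehicle_recalls",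
--         "consumer_product_recalls",
--         "workplace_safety",
--         "agency_warnings",
--     ],
-- }
--
-- PERSONAS: list[str] = list(PERSONA_BUNDLES.keys())
--
-- def derive_persona_tags(category_tags: list[str] | None) -> list[str]:
--     """Derive persona_tags from a signal's category_tags.
--
--     A persona is tagged if any of its bundle categories appear in the signal's
--     category_tags. Stable, deterministic, idempotent.
--
--     Returns personas in the same order as PERSONAS for stable output.
--     """
--     if not category_tags:
--         return []
--     cats = set(category_tags)
--     out: list[str] = []
--     for persona in PERSONAS:
--         bundle = PERSONA_BUNDLES[persona]
--         if any(c in cats for c in bundle):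
--             out.append(persona)
--     return out
-- ===== SOURCE B (Python) =====
-- # B: input-driven lookup in a precomputed inverted index (category -> personas)
-- # instead of scanning every persona's bundle per call.
--
-- PERSONAS = [
--     "journalist", "pharma_analyst", "hedge_fund", "environmental",
--     "policy_researcher", "legal_analyst", "consumer_safety",
-- ]
--
-- # Inverted index of PERSONA_BUNDLES: each category -> personas whose bundle contains it.
-- CATEGORY_TO_PERSONAS = {
--     "oversight_findings": ["journalist", "environmental", "policy_researcher"],
--     "agency_enforcement": ["journalist", "hedge_fund", "environmental", "legal_analyst"],
--     "foia_logs": ["journalist", "legal_analyst"],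
--     "government_litigation": ["journalist", "legal_analyst"],
--     "campaign_finance": ["journalist", "legal_analyst"],
--     "lobbying_ethics": ["journalist", "policy_researcher"],
--     "tax_enforcement": ["journalist", "legal_analyst"],
--     "agency_warnings": ["pharma_analyst", "consumer_safety"],
--     "drug_recalls": ["pharma_analyst", "hedge_fund", "consumer_safety"],
--     "device_recalls": ["pharma_analyst", "hedge_fund", "consumer_safety"],
--     "securities_litigation": ["pharma_analyst", "hedge_fund", "legal_analyst"],
--     "federal_contracts": ["hedge_fund"],
--     "court_opinions": ["hedge_fund", "legal_analyst"],
--     "regulatory_dockets": ["environmental", "policy_researcher"],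
--     "legislation": ["policy_researcher"],
--     "executive_actions": ["policy_researcher"],
--     "food_recalls": ["consumer_safety"],
--     "vehicle_recalls": ["consumer_safety"],
--     "consumer_product_recalls": ["consumer_safety"],
--     "workplace_safety": ["consumer_safety"],
-- }
--
--
-- def derive_persona_tags(category_tags):
--     if not category_tags:
--         return []
--     matched = set()
--     for tag in category_tags:
--         matched.update(CATEGORY_TO_PERSONAS.get(tag, []))
--     return [p for p in PERSONAS if p in matched]
-- ===== Notes on version B (the rewrite author's own statement) =====
-- stated objective: alternative
-- what changed: Replaces A's per-call scan of every persona's bundle (with a set of the input tags) by lookups of each input tag in a precomputed module-level inverted index CATEGORY_TO_PERSONAS, collecting matched personas in a set and restoring canonical PERSONAS order at the end.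
import Mathlib
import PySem

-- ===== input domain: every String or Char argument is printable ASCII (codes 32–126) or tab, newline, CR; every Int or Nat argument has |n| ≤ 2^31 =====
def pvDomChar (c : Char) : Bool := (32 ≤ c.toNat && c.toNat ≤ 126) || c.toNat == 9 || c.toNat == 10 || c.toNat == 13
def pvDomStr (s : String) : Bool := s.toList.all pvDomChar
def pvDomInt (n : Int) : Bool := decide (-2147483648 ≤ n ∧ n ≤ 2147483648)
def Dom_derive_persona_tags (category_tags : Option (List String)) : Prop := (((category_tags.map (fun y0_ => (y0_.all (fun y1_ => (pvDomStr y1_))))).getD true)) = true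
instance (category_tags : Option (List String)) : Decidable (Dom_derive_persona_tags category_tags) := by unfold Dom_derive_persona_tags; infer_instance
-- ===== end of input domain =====

-- B replaces A's per-call scan of every persona's bundle by looking the input tags up
-- in a precomputed inverted index (category -> personas); alternative data structure.


-- ===== PORT A =====
def PERSONA_BUNDLES : PySem.Dict String (List String) := PySem.Dict.ofList [
  ("journalist", ["oversight_findings", "agency_enforcement", "foia_logs",
    "government_litigation", "campaign_finance", "lobbying_ethics", "tax_enforcement"]),
  ("pharma_analyst", ["agency_warnings", "drug_recalls", "device_recalls", "securities_litigation"]),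
  ("hedge_fund", ["securities_litigation", "agency_enforcement", "federal_contracts",
    "court_opinions", "drug_recalls", "device_recalls"]),
  ("environmental", ["agency_enforcement", "oversight_findings", "regulatory_dockets"]),
  ("policy_researcher", ["legislation", "regulatory_dockets", "oversight_findings",
    "executive_actions", "lobbying_ethics"]),
  ("legal_analyst", ["court_opinions", "securities_litigation", "government_litigation",
    "agency_enforcement", "foia_logs", "campaign_finance", "tax_enforcement"]),
  ("consumer_safety", ["drug_recalls", "food_recalls", "device_recalls", "vehicle_recalls",
    "consumer_product_recalls", "workplace_safety", "agency_warnings"])]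

def PERSONAS : List String := PERSONA_BUNDLES.keys

def derive_persona_tags (category_tags : Option (List String)) : List String :=
  match category_tags with
  | none => []
  | some tags =>
    if tags = [] then []
    else
      let cats := PySem.Set.ofList tags
      PERSONAS.foldl (fun out persona =>
        -- PERSONA_BUNDLES[persona]: the key is always present (persona ∈ keys), so `.getD []` is exact
        let bundle := (PERSONA_BUNDLES.get? persona).getD []
        if bundle.any (fun c => PySem.Set.contains cats c) then out ++ [persona] else out) []

-- ===== PORT B =====
def PERSONAS_B : List String :=
  ["journalist", "pharma_analyst", "hedge_fund", "environmental",
   "policy_researcher", "legal_analyst", "consumer_safety"]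

def CATEGORY_TO_PERSONAS : PySem.Dict String (List String) := PySem.Dict.ofList [
  ("oversight_findings", ["journalist", "environmental", "policy_researcher"]),
  ("agency_enforcement", ["journalist", "hedge_fund", "environmental", "legal_analyst"]),
  ("foia_logs", ["journalist", "legal_analyst"]),
  ("government_litigation", ["journalist", "legal_analyst"]),
  ("campaign_finance", ["journalist", "legal_analyst"]),
  ("lobbying_ethics", ["journalist", "policy_researcher"]),
  ("tax_enforcement", ["journalist", "legal_analyst"]),
  ("agency_warnings", ["pharma_analyst", "consumer_safety"]),
  ("drug_recalls", ["pharma_analyst", "hedge_fund", "consumer_safety"]),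
  ("device_recalls", ["pharma_analyst", "hedge_fund", "consumer_safety"]),
  ("securities_litigation", ["pharma_analyst", "hedge_fund", "legal_analyst"]),
  ("federal_contracts", ["hedge_fund"]),
  ("court_opinions", ["hedge_fund", "legal_analyst"]),
  ("regulatory_dockets", ["environmental", "policy_researcher"]),
  ("legislation", ["policy_researcher"]),
  ("executive_actions", ["policy_researcher"]),
  ("food_recalls", ["consumer_safety"]),
  ("vehicle_recalls", ["consumer_safety"]),
  ("consumer_product_recalls", ["consumer_safety"]),
  ("workplace_safety", ["consumer_safety"])]

def derive_persona_tags_alt (category_tags : Option (List String)) : List String :=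
  match category_tags with
  | none => []
  | some tags =>
    if tags = [] then []
    else
      let matched := tags.foldl
        (fun s tag => PySem.Set.update s (CATEGORY_TO_PERSONAS.getD tag [])) PySem.Set.empty
      PERSONAS_B.filter (fun p => PySem.Set.contains matched p)

-- ===== PRECONDITION & SPEC =====
def Spec_derive_persona_tags (category_tags : Option (List String)) (out : List String) : Prop := out = derive_persona_tags_alt category_tags
instance (category_tags : Option (List String)) (out : List String) : Decidable (Spec_derive_persona_tags category_tags out) := by unfold Spec_derive_persona_tags; infer_instance

-- ===== CLAIM (what is proved, stated in full; the proofs are below) =====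
def Claim_equal_derive_persona_tags : Prop := ∀ (category_tags : Option (List String)), Dom_derive_persona_tags category_tags → Spec_derive_persona_tags category_tags (derive_persona_tags category_tags)

-- ===== LEMMAS AND PROOFS =====

-- membership in B's `matched` set
lemma mem_matched (tags : List String) (p : String) :
    p ∈ tags.foldl
      (fun s tag => PySem.Set.update s (CATEGORY_TO_PERSONAS.getD tag [])) PySem.Set.empty
    ↔ ∃ t ∈ tags, p ∈ CATEGORY_TO_PERSONAS.getD t [] := by
  have h : ∀ (l : List String) (s : List String),
      p ∈ l.foldl (fun s tag => PySem.Set.update s (CATEGORY_TO_PERSONAS.getD tag [])) s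
      ↔ p ∈ s ∨ ∃ t ∈ l, p ∈ CATEGORY_TO_PERSONAS.getD t [] := by
    intro l
    induction l with
    | nil => simp
    | cons a l ih =>
      intro s
      simp [List.foldl_cons, ih]
      tauto
  simpa [PySem.Set.empty] using h tags []

-- membership in a list-valued dict lookup with default [], for a dict with distinct keys
lemma mem_getD_iff {ν : Type} (d : PySem.Dict String (List ν)) (hnd : d.keys.Nodup) (t : String) (p : ν) :
    p ∈ d.getD t [] ↔ ∃ v, (t, v) ∈ d.items ∧ p ∈ v := by
  rw [PySem.Dict.getD_eq_get?_getD]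
  cases h : d.get? t with
  | none =>
    simp only [Option.getD_none, List.not_mem_nil, false_iff]
    rintro ⟨v, hv, -⟩
    have := (PySem.Dict.get?_eq_some_iff_mem_items d t v hnd).mpr hv
    rw [h] at this; cases this
  | some v =>
    simp only [Option.getD_some]
    constructor
    · exact fun hp => ⟨v, (PySem.Dict.get?_eq_some_iff_mem_items d t v hnd).mp h, hp⟩
    · rintro ⟨w, hw, hp⟩
      have := (PySem.Dict.get?_eq_some_iff_mem_items d t w hnd).mpr hw
      rw [h] at this; cases this; exact hp

-- the inverted index as a literal association list (ofList computes to mk here: distinct keys)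
lemma idx_eq_mk : CATEGORY_TO_PERSONAS = PySem.Dict.mk [
  ("oversight_findings", ["journalist", "environmental", "policy_researcher"]),
  ("agency_enforcement", ["journalist", "hedge_fund", "environmental", "legal_analyst"]),
  ("foia_logs", ["journalist", "legal_analyst"]),
  ("government_litigation", ["journalist", "legal_analyst"]),
  ("campaign_finance", ["journalist", "legal_analyst"]),
  ("lobbying_ethics", ["journalist", "policy_researcher"]),
  ("tax_enforcement", ["journalist", "legal_analyst"]),
  ("agency_warnings", ["pharma_analyst", "consumer_safety"]),
  ("drug_recalls", ["pharma_analyst", "hedge_fund", "consumer_safety"]),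
  ("device_recalls", ["pharma_analyst", "hedge_fund", "consumer_safety"]),
  ("securities_litigation", ["pharma_analyst", "hedge_fund", "legal_analyst"]),
  ("federal_contracts", ["hedge_fund"]),
  ("court_opinions", ["hedge_fund", "legal_analyst"]),
  ("regulatory_dockets", ["environmental", "policy_researcher"]),
  ("legislation", ["policy_researcher"]),
  ("executive_actions", ["policy_researcher"]),
  ("food_recalls", ["consumer_safety"]),
  ("vehicle_recalls", ["consumer_safety"]),
  ("consumer_product_recalls", ["consumer_safety"]),
  ("workplace_safety", ["consumer_safety"])] := by rfl

lemma nodup_idx_keys : CATEGORY_TO_PERSONAS.keys.Nodup := by rw [idx_eq_mk]; decide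

-- A's bundle dict as a literal association list (ofList computes to mk: distinct keys)
lemma bundles_eq_mk : PERSONA_BUNDLES = PySem.Dict.mk [
  ("journalist", ["oversight_findings", "agency_enforcement", "foia_logs",
    "government_litigation", "campaign_finance", "lobbying_ethics", "tax_enforcement"]),
  ("pharma_analyst", ["agency_warnings", "drug_recalls", "device_recalls", "securities_litigation"]),
  ("hedge_fund", ["securities_litigation", "agency_enforcement", "federal_contracts",
    "court_opinions", "drug_recalls", "device_recalls"]),
  ("environmental", ["agency_enforcement", "oversight_findings", "regulatory_dockets"]),
  ("policy_researcher", ["legislation", "regulatory_dockets", "oversight_findings",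
    "executive_actions", "lobbying_ethics"]),
  ("legal_analyst", ["court_opinions", "securities_litigation", "government_litigation",
    "agency_enforcement", "foia_logs", "campaign_finance", "tax_enforcement"]),
  ("consumer_safety", ["drug_recalls", "food_recalls", "device_recalls", "vehicle_recalls",
    "consumer_product_recalls", "workplace_safety", "agency_warnings"])] := by rfl

lemma bool_ext {a b : Bool} (h : a = true ↔ b = true) : a = b := by
  cases a <;> cases b <;> simp_all

set_option maxHeartbeats 1000000 in
lemma main_nonempty (tags : List String) (hne : ¬ tags = []) :
    derive_persona_tags (some tags) = derive_persona_tags_alt (some tags) := by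
  unfold derive_persona_tags derive_persona_tags_alt
  simp only [if_neg hne]
  have hpersonas : PERSONAS = PERSONAS_B := by rfl
  rw [hpersonas, PySem.List.foldl_append_if_eq_filter, List.nil_append]
  apply List.filter_congr
  intro p hp
  apply bool_ext
  simp only [List.any_eq_true, PySem.Set.contains_iff, PySem.Set.mem_ofList,
    mem_matched, mem_getD_iff CATEGORY_TO_PERSONAS nodup_idx_keys]
  rw [idx_eq_mk]
  fin_cases hp <;>
    simp [bundles_eq_mk, PySem.Dict.get?_mk_cons, or_and_right, and_or_left,
      exists_or, and_assoc] <;> tauto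

-- ===== VERDICT (by name: the statement is the Claim_ definition above) =====
theorem derive_persona_tags_spec : Claim_equal_derive_persona_tags := by
  intro ct _
  unfold Spec_derive_persona_tags
  match ct with
  | none => rfl
  | some tags =>
    by_cases h : tags = []
    · subst h; rfl
    · exact main_nonempty tags h
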